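-- pv_equiv track=rewrite | github.com/marimasunaga/herpes_keratitis_model | FigS4/visualize_filtering_stages.py | remove_short_overlapping_branches
-- ===== SOURCE A (Python) =====
-- def remove_short_overlapping_branches(filtered_branches, common_len_thr):
--     """
--     Remove shorter branches when two branches share a long common initial segment.
--     """
--     fb = dict(filtered_branches)
--     eps = list(fb.keys())
--     remove = set()
--
--     for i in range(len(eps)):
--         ep1 = eps[i]
--         path1 = fb[ep1]
--         for j in range(i + 1, len(eps)):
--             ep2 = eps[j]
--             path2 = fb[ep2]
--             common = 0
--             for k in range(min(len(path1), len(path2))):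
--                 if path1[k] == path2[k]:
--                     common += 1
--                 else:
--                     break
--             if common >= common_len_thr:
--                 if len(path1) < len(path2):
--                     remove.add(ep1)
--                 else:
--                     remove.add(ep2)
--
--     for r in remove:
--         fb.pop(r, None)
--     return fb, list(fb.keys())
-- ===== SOURCE B (Python) =====
-- def remove_short_overlapping_branches(filtered_branches, common_len_thr):
--     """
--     Remove shorter branches when two branches share a long common initial segment.
--     Single pass: group paths by their length-common_len_thr prefix and keep, per
--     group, the first branch of maximal path length.
--     """
--     fb = dict(filtered_branches)
--     best = {}  # group key -> (path length, ep of first max-length member)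
--     for ep, path in fb.items():
--         if common_len_thr > 0 and len(path) < common_len_thr:
--             continue  # too short to share a prefix of that length: always kept
--         key = tuple(path[:common_len_thr]) if common_len_thr > 0 else ()
--         if key not in best or len(path) > best[key][0]:
--             best[key] = (len(path), ep)
--     keep = {ep for _, ep in best.values()}
--     out = {ep: p for ep, p in fb.items()
--            if (common_len_thr > 0 and len(p) < common_len_thr) or ep in keep}
--     return out, list(out.keys())
-- ===== Notes on version B (the rewrite author's own statement) =====
-- stated objective: faster
-- what changed: Replaces the all-pairs prefix comparison with a single pass that buckets each path by its length-common_len_thr prefix and keeps, per bucket, the first branch of maximal length.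
import Mathlib
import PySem

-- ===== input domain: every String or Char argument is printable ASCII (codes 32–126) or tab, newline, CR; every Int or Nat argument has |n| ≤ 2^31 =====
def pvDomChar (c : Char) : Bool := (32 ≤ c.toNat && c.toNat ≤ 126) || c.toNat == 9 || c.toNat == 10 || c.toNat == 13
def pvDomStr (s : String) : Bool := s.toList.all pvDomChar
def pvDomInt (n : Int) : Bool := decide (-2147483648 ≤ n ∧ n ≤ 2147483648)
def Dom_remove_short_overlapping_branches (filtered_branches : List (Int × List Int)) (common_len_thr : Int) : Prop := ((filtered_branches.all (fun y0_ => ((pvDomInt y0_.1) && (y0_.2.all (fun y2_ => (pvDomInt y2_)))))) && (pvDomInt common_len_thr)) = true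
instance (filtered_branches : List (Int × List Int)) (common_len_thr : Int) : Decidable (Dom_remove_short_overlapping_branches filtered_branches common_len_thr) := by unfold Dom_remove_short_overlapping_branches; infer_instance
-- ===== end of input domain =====

-- B replaces A's all-pairs prefix comparison by a single grouping pass (bucket by length-thr prefix,
-- keep the first longest branch of each bucket); measured asymptotically faster on the timing inputs.

-- ===== PORT A =====
-- inner `for k in range(...): if ...: common += 1 else: break` loop of A (break = stop recursing)
def pvCommonLoopA (path1 path2 : List Int) : List Int → Int → Int
  | [], common => common
  | k :: ks, common =>
    if PySem.List.pyGetD path1 k 0 == PySem.List.pyGetD path2 k 0 then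
      pvCommonLoopA path1 path2 ks (common + 1)
    else common

def remove_short_overlapping_branches (filtered_branches : List (Int × List Int)) (common_len_thr : Int) : (List (Int × List Int)) × List Int :=
  let fb0 : PySem.Dict Int (List Int) := PySem.Dict.ofList filtered_branches
  let eps : List Int := fb0.keys
  let remove : PySem.Set Int :=
    (PySem.List.pyRange 0 (PySem.List.len eps) 1).foldl (fun rem i =>
      let ep1 := PySem.List.pyGetD eps i 0
      let path1 := fb0.getD ep1 []
      (PySem.List.pyRange (i + 1) (PySem.List.len eps) 1).foldl (fun rem j =>
        let ep2 := PySem.List.pyGetD eps j 0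
        let path2 := fb0.getD ep2 []
        let common := pvCommonLoopA path1 path2
          (PySem.List.pyRange 0 (min (PySem.List.len path1) (PySem.List.len path2)) 1) 0
        if common ≥ common_len_thr then
          if PySem.List.len path1 < PySem.List.len path2 then PySem.Set.add rem ep1
          else PySem.Set.add rem ep2
        else rem) rem) PySem.Set.empty
  -- `for r in remove: fb.pop(r, None)` — the resulting dict does not depend on the set's iteration order
  let fb : PySem.Dict Int (List Int) := remove.foldl (fun d r => d.erase r) fb0
  (fb.items, fb.keys)

-- ===== PORT B =====
def remove_short_overlapping_branches_alt (filtered_branches : List (Int × List Int)) (common_len_thr : Int) : (List (Int × List Int)) × List Int :=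
  let fb : PySem.Dict Int (List Int) := PySem.Dict.ofList filtered_branches
  let best : PySem.Dict (List Int) (Int × Int) :=
    fb.items.foldl (fun best p =>
      if common_len_thr > 0 && PySem.List.len p.2 < common_len_thr then best
      else
        let key := if common_len_thr > 0 then PySem.List.slice p.2 none (some common_len_thr) else []
        if !best.contains key || PySem.List.len p.2 > (best.getD key (0, 0)).1 then
          best.insert key (PySem.List.len p.2, p.1)
        else best) PySem.Dict.empty
  -- `{ep for _, ep in best.values()}` — consumed only through membership tests
  let keep : PySem.Set Int := best.values.foldl (fun s v => PySem.Set.add s v.2) PySem.Set.empty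
  let out : PySem.Dict Int (List Int) :=
    fb.items.foldl (fun d p =>
      if (common_len_thr > 0 && PySem.List.len p.2 < common_len_thr) || keep.contains p.1 then
        d.insert p.1 p.2
      else d) PySem.Dict.empty
  (out.items, out.keys)

-- ===== PRECONDITION & SPEC =====
def Spec_remove_short_overlapping_branches (filtered_branches : List (Int × List Int)) (common_len_thr : Int) (out : (List (Int × List Int)) × List Int) : Prop := out = remove_short_overlapping_branches_alt filtered_branches common_len_thr
instance (filtered_branches : List (Int × List Int)) (common_len_thr : Int) (out : (List (Int × List Int)) × List Int) : Decidable (Spec_remove_short_overlapping_branches filtered_branches common_len_thr out) := by unfold Spec_remove_short_overlapping_branches; infer_instance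

-- ===== CLAIM (what is proved, stated in full; the proofs are below) =====
def Claim_equal_remove_short_overlapping_branches : Prop := ∀ (filtered_branches : List (Int × List Int)) (common_len_thr : Int), Dom_remove_short_overlapping_branches filtered_branches common_len_thr → Spec_remove_short_overlapping_branches filtered_branches common_len_thr (remove_short_overlapping_branches filtered_branches common_len_thr)

-- ===== LEMMAS AND PROOFS =====

-- length of the longest common initial segment of two paths
def pvLcp : List Int → List Int → Int
  | a :: as, b :: bs => if a = b then 1 + pvLcp as bs else 0
  | _, _ => 0

-- a path participates in grouping (for thr > 0 it must be at least thr long)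
abbrev pvKeyed (thr : Int) (p : List Int) : Prop := 0 < thr → thr ≤ (p.length : Int)


-- the grouping key of a path
def pvKey (thr : Int) (p : List Int) : List Int := if 0 < thr then p.take thr.toNat else []

theorem pvLcp_nonneg (p q : List Int) : 0 ≤ pvLcp p q := by
  induction p generalizing q with
  | nil => simp [pvLcp]
  | cons a as ih =>
    cases q with
    | nil => simp [pvLcp]
    | cons b bs =>
      simp only [pvLcp]
      have := ih bs
      split <;> omega

theorem pvLcp_ge_nat (n : Nat) (p q : List Int) :
    ((n : Int) ≤ pvLcp p q) ↔ (n ≤ p.length ∧ n ≤ q.length ∧ p.take n = q.take n) := by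
  induction n generalizing p q with
  | zero => simpa using pvLcp_nonneg p q
  | succ n ih =>
    match p, q with
    | [], _ => simp [pvLcp]
    | a :: as, [] => simp [pvLcp]
    | a :: as, b :: bs =>
      by_cases hab : a = b
      · subst hab
        rw [show pvLcp (a :: as) (a :: bs) = 1 + pvLcp as bs from by simp [pvLcp]]
        simp only [List.take_succ_cons, List.cons.injEq, true_and, List.length_cons]
        rw [show ((((n : Nat) + 1 : Nat) : Int) ≤ 1 + pvLcp as bs) ↔ ((n : Int) ≤ pvLcp as bs) by push_cast; omega]
        rw [ih as bs]
        constructor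
        · rintro ⟨h1, h2, h3⟩; exact ⟨by omega, by omega, h3⟩
        · rintro ⟨h1, h2, h3⟩; exact ⟨by omega, by omega, h3⟩
      · rw [show pvLcp (a :: as) (b :: bs) = 0 from by simp [pvLcp, hab]]
        simp only [List.take_succ_cons, List.cons.injEq]
        constructor
        · intro h; exfalso; have := Int.natCast_pos.mpr (Nat.succ_pos n); omega
        · rintro ⟨-, -, h, -⟩; exact absurd h hab

-- threshold test on the lcp ↔ same group
theorem pvTrig_iff (thr : Int) (p q : List Int) :
    (thr ≤ pvLcp p q) ↔ (pvKeyed thr p ∧ pvKeyed thr q ∧ pvKey thr p = pvKey thr q) := by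
  by_cases ht : 0 < thr
  · have key := pvLcp_ge_nat thr.toNat p q
    rw [show ((thr.toNat : Nat) : Int) = thr from by omega] at key
    rw [pvKey, pvKey, if_pos ht, if_pos ht, pvKeyed, pvKeyed, key]
    constructor
    · rintro ⟨h2, h3, h4⟩
      exact ⟨fun _ => by omega, fun _ => by omega, h4⟩
    · rintro ⟨h2, h3, h4⟩
      exact ⟨by have := h2 ht; omega, by have := h3 ht; omega, h4⟩
  · have := pvLcp_nonneg p q
    simp only [pvKeyed, pvKey, if_neg ht]
    constructor
    · intro _; exact ⟨fun h => absurd h ht, fun h => absurd h ht, by trivial⟩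
    · intro _; omega

-- A's break-loop computes the lcp of the remaining suffixes
theorem pvCommonLoopA_go (p q : List Int) (n : Nat) :
    ∀ (i : Int), 0 ≤ i → ((min (p.length : Int) (q.length : Int)) - i).toNat = n →
    ∀ c, pvCommonLoopA p q (PySem.List.pyRange i (min (PySem.List.len p) (PySem.List.len q)) 1) c
      = c + pvLcp (p.drop i.toNat) (q.drop i.toNat) := by
  induction n with
  | zero =>
    intro i hi hn c
    have hm : min (PySem.List.len p) (PySem.List.len q) ≤ i := by
      simp only [PySem.List.len_eq]; omega
    rw [PySem.List.pyRange_one_eq_nil hm]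
    have hor : p.length ≤ i.toNat ∨ q.length ≤ i.toNat := by
      simp only [PySem.List.len_eq] at hm; omega
    have : p.drop i.toNat = [] ∨ q.drop i.toNat = [] := by
      rcases hor with h | h
      · left; exact List.drop_eq_nil_of_le h
      · right; exact List.drop_eq_nil_of_le h
    rcases this with h | h <;> rw [h] <;> cases h2 : (p.drop i.toNat) <;> cases h3 : (q.drop i.toNat) <;>
      simp_all [pvCommonLoopA, pvLcp]
  | succ n ih =>
    intro i hi hn c
    have hlt : i < min (PySem.List.len p) (PySem.List.len q) := by
      simp only [PySem.List.len_eq]; omega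
    rw [PySem.List.pyRange_one_cons hlt]
    have hip : i < (p.length : Int) := by simp only [PySem.List.len_eq] at hlt; omega
    have hiq : i < (q.length : Int) := by simp only [PySem.List.len_eq] at hlt; omega
    have hip' : i.toNat < p.length := by omega
    have hiq' : i.toNat < q.length := by omega
    have hdp := List.drop_eq_getElem_cons hip'
    have hdq := List.drop_eq_getElem_cons hiq'
    have hstep : (i + 1).toNat = i.toNat + 1 := by omega
    simp only [pvCommonLoopA, PySem.List.pyGetD_eq_getElem p 0 hi hip,
      PySem.List.pyGetD_eq_getElem q 0 hi hiq]
    by_cases hab : p[i.toNat] = q[i.toNat]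
    · rw [if_pos (by simpa using hab)]
      rw [ih (i + 1) (by omega) (by omega) (c + 1)]
      rw [hdp, hdq, hstep]
      simp only [pvLcp, if_pos hab]
      omega
    · rw [if_neg (by simpa using hab)]
      rw [hdp, hdq]
      simp only [pvLcp, if_neg hab]
      omega

theorem pvCommonLoopA_eq (p q : List Int) :
    pvCommonLoopA p q (PySem.List.pyRange 0 (min (PySem.List.len p) (PySem.List.len q)) 1) 0 = pvLcp p q := by
  have := pvCommonLoopA_go p q ((min (p.length : Int) (q.length : Int)).toNat) 0 (le_refl 0) (by omega) 0
  simpa using this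

-- ---------- generic "all ordered pairs" fold shape ----------
def pvPairFold {α S : Type} (F : α → List α → S → S) : List α → S → S
  | [], s => s
  | x :: xs, s => pvPairFold F xs (F x xs s)

theorem pvPairFold_map {α β S : Type} (F : β → List β → S → S) (g : α → β) (l : List α) :
    ∀ s, pvPairFold F (l.map g) s = pvPairFold (fun e t s => F (g e) (t.map g) s) l s := by
  induction l with
  | nil => intro s; rfl
  | cons x xs ih => intro s; simp only [List.map_cons, pvPairFold, ih]

theorem pvPairFold_congr {α S : Type} (F F' : α → List α → S → S) (l : List α)
    (h : ∀ e ∈ l, ∀ t : List α, (∀ y ∈ t, y ∈ l) → ∀ s, F e t s = F' e t s) :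
    ∀ s, pvPairFold F l s = pvPairFold F' l s := by
  induction l with
  | nil => intro s; rfl
  | cons x xs ih =>
    intro s
    simp only [pvPairFold]
    rw [h x (by simp) xs (fun y hy => by simp [hy])]
    exact ih (fun e he t ht s => h e (by simp [he]) t (fun y hy => by simp [ht y hy]) s) _

-- index-range outer loop = structural pair fold
theorem pvOuter {α S : Type} (xs : List α) (d : α) (F : α → List α → S → S) (n : Nat) :
    ∀ (i : Int), 0 ≤ i → xs.length - i.toNat = n →
    ∀ s, (PySem.List.pyRange i (PySem.List.len xs) 1).foldl
        (fun s k => F (PySem.List.pyGetD xs k d) (xs.drop (k + 1).toNat) s) s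
      = pvPairFold F (xs.drop i.toNat) s := by
  induction n with
  | zero =>
    intro i hi hn s
    have h1 : PySem.List.len xs ≤ i := by simp only [PySem.List.len_eq]; omega
    rw [PySem.List.pyRange_one_eq_nil h1, List.drop_eq_nil_of_le (by omega)]
    rfl
  | succ n ih =>
    intro i hi hn s
    have hlt : i < PySem.List.len xs := by simp only [PySem.List.len_eq]; omega
    have hlt' : i.toNat < xs.length := by simp only [PySem.List.len_eq] at hlt; omega
    rw [PySem.List.pyRange_one_cons hlt]
    simp only [List.foldl_cons]
    rw [ih (i + 1) (by omega) (by omega)]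
    rw [List.drop_eq_getElem_cons hlt']
    simp only [pvPairFold]
    rw [PySem.List.pyGetD_eq_getElem xs d hi (by simp only [PySem.List.len_eq] at hlt; exact hlt)]
    have : (i + 1).toNat = i.toNat + 1 := by omega
    rw [this]

-- ---------- A-side: the remove set ----------
def pvStep (thr : Int) (s : PySem.Set Int) (e1 e2 : Int × List Int) : PySem.Set Int :=
  if thr ≤ pvLcp e1.2 e2.2 then
    (if (e1.2.length : Int) < (e2.2.length : Int) then PySem.Set.add s e1.1 else PySem.Set.add s e2.1)
  else s

def pvStepF (thr : Int) (e : Int × List Int) (t : List (Int × List Int)) (s : PySem.Set Int) : PySem.Set Int :=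
  t.foldl (fun s e2 => pvStep thr s e e2) s

-- who gets removed, structurally
def pvRemP (thr : Int) : List (Int × List Int) → Int → Prop
  | [], _ => False
  | e :: t, x =>
    (∃ e2 ∈ t, thr ≤ pvLcp e.2 e2.2 ∧
      x = (if (e.2.length : Int) < (e2.2.length : Int) then e.1 else e2.1)) ∨ pvRemP thr t x

theorem mem_pvStepF (thr : Int) (e : Int × List Int) (t : List (Int × List Int)) (x : Int) :
    ∀ s, x ∈ pvStepF thr e t s ↔ x ∈ s ∨
      (∃ e2 ∈ t, thr ≤ pvLcp e.2 e2.2 ∧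
        x = (if (e.2.length : Int) < (e2.2.length : Int) then e.1 else e2.1)) := by
  induction t with
  | nil => intro s; simp [pvStepF]
  | cons e2 t ih =>
    intro s
    simp only [pvStepF, List.foldl_cons]
    rw [show (t.foldl (fun s e2 => pvStep thr s e e2) (pvStep thr s e e2)) = pvStepF thr e t (pvStep thr s e e2) from rfl]
    rw [ih]
    unfold pvStep
    split_ifs with h1 h2 <;>
      simp only [PySem.Set.mem_add, List.mem_cons] <;> constructor <;> intro hh
    · rcases hh with (hh | hh) | hh
      · exact Or.inl hh
      · exact Or.inr ⟨e2, Or.inl rfl, h1, by rw [if_pos h2, hh]⟩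
      · rcases hh with ⟨e3, he3, h3, h4⟩; exact Or.inr ⟨e3, Or.inr he3, h3, h4⟩
    · rcases hh with hh | ⟨e3, he3, h3, h4⟩
      · exact Or.inl (Or.inl hh)
      · rcases he3 with he3 | he3
        · subst he3; rw [if_pos h2] at h4; exact Or.inl (Or.inr h4)
        · exact Or.inr ⟨e3, he3, h3, h4⟩
    · rcases hh with (hh | hh) | hh
      · exact Or.inl hh
      · exact Or.inr ⟨e2, Or.inl rfl, h1, by rw [if_neg h2, hh]⟩
      · rcases hh with ⟨e3, he3, h3, h4⟩; exact Or.inr ⟨e3, Or.inr he3, h3, h4⟩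
    · rcases hh with hh | ⟨e3, he3, h3, h4⟩
      · exact Or.inl (Or.inl hh)
      · rcases he3 with he3 | he3
        · subst he3; rw [if_neg h2] at h4; exact Or.inl (Or.inr h4)
        · exact Or.inr ⟨e3, he3, h3, h4⟩
    · rcases hh with hh | hh
      · exact Or.inl hh
      · rcases hh with ⟨e3, he3, h3, h4⟩; exact Or.inr ⟨e3, Or.inr he3, h3, h4⟩
    · rcases hh with hh | ⟨e3, he3, h3, h4⟩
      · exact Or.inl hh
      · rcases he3 with he3 | he3
        · subst he3; exact absurd h3 h1
        · exact Or.inr ⟨e3, he3, h3, h4⟩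

theorem mem_pvPairFold_stepF (thr : Int) (l : List (Int × List Int)) (x : Int) :
    ∀ s, x ∈ pvPairFold (pvStepF thr) l s ↔ x ∈ s ∨ pvRemP thr l x := by
  induction l with
  | nil => intro s; simp [pvPairFold, pvRemP]
  | cons e t ih =>
    intro s
    simp only [pvPairFold, pvRemP]
    rw [ih, mem_pvStepF]
    exact or_assoc

theorem pvRemP_mem_fst (thr : Int) (l : List (Int × List Int)) (x : Int) :
    pvRemP thr l x → x ∈ l.map Prod.fst := by
  induction l with
  | nil => intro h; exact absurd h (by simp [pvRemP])
  | cons e t ih =>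
    intro h
    rcases h with ⟨e2, he2, -, h4⟩ | h
    · split_ifs at h4
      · simp [h4]
      · subst h4; simp only [List.map_cons, List.mem_cons]
        exact Or.inr (List.mem_map_of_mem he2)
    · simp only [List.map_cons, List.mem_cons]; exact Or.inr (ih h)

-- A keeps an entry iff it is strictly longer than every triggering earlier entry
-- and at least as long as every triggering later entry
def pvSurv (thr : Int) (u : List (Int × List Int)) (e : Int × List Int) (v : List (Int × List Int)) : Prop :=
  (∀ e' ∈ u, thr ≤ pvLcp e'.2 e.2 → (e'.2.length : Int) < (e.2.length : Int)) ∧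
  (∀ e' ∈ v, thr ≤ pvLcp e.2 e'.2 → (e'.2.length : Int) ≤ (e.2.length : Int))

theorem pvNotRemP_iff (thr : Int) (u : List (Int × List Int)) (e : Int × List Int)
    (v : List (Int × List Int)) :
    ((u ++ e :: v).map Prod.fst).Nodup →
    (¬ pvRemP thr (u ++ e :: v) e.1 ↔ pvSurv thr u e v) := by
  induction u with
  | nil =>
    intro hnd
    simp only [List.nil_append, List.map_cons, List.nodup_cons] at hnd
    obtain ⟨hmem, hnd2⟩ := hnd
    simp only [List.nil_append, pvRemP, pvSurv]
    constructor
    · intro hno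
      refine ⟨by simp, fun e2 he2 htr => ?_⟩
      by_contra hlt
      push_neg at hlt
      exact hno (Or.inl ⟨e2, he2, htr, by rw [if_pos (by exact_mod_cast hlt)]⟩)
    · rintro ⟨-, hs⟩ hrem
      rcases hrem with ⟨e2, he2, htr, hv⟩ | hrem
      · split_ifs at hv with hlen
        · have := hs e2 he2 htr
          have : ((e2.2.length : Int)) ≤ (e.2.length : Int) := this
          omega
        · exact hmem (by rw [hv]; exact List.mem_map_of_mem he2)
      · exact hmem (pvRemP_mem_fst thr v e.1 hrem)
  | cons e' u' ih =>
    intro hnd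
    simp only [List.cons_append, List.map_cons, List.nodup_cons] at hnd
    obtain ⟨hmem, hnd2⟩ := hnd
    have hemem : e ∈ u' ++ e :: v := by simp
    have hne : e.1 ≠ e'.1 := by
      intro hq
      exact hmem (hq ▸ List.mem_map_of_mem hemem)
    have hinj := List.inj_on_of_nodup_map hnd2
    have hhead : (∃ e2 ∈ u' ++ e :: v, thr ≤ pvLcp e'.2 e2.2 ∧
        e.1 = (if (e'.2.length : Int) < (e2.2.length : Int) then e'.1 else e2.1))
        ↔ (thr ≤ pvLcp e'.2 e.2 ∧ (e.2.length : Int) ≤ (e'.2.length : Int)) := by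
      constructor
      · rintro ⟨e2, he2, htr, hv⟩
        split_ifs at hv with hlen
        · exact absurd hv hne
        · have he2e : e2 = e := hinj he2 hemem hv.symm
          subst he2e
          exact ⟨htr, by omega⟩
      · rintro ⟨htr, hlen⟩
        exact ⟨e, hemem, htr, by rw [if_neg (by omega)]⟩
    have hgoal : pvRemP thr ((e' :: u') ++ e :: v) e.1 ↔
        ((∃ e2 ∈ u' ++ e :: v, thr ≤ pvLcp e'.2 e2.2 ∧
          e.1 = (if (e'.2.length : Int) < (e2.2.length : Int) then e'.1 else e2.1))
          ∨ pvRemP thr (u' ++ e :: v) e.1) := by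
      simp only [List.cons_append, pvRemP]
    rw [hgoal, not_or, hhead, ih hnd2]
    simp only [pvSurv, List.forall_mem_cons]
    constructor
    · rintro ⟨h1, h2, h3⟩
      refine ⟨⟨fun htr => ?_, h2⟩, h3⟩
      by_contra hc
      push_neg at hc
      exact h1 ⟨htr, by omega⟩
    · rintro ⟨⟨h1, h2⟩, h3⟩
      refine ⟨?_, h2, h3⟩
      rintro ⟨htr, hlen⟩
      have := h1 htr
      omega

-- ---------- B-side: the best dict ----------
def pvBestStep (thr : Int) (best : PySem.Dict (List Int) (Int × Int)) (p : Int × List Int) :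
    PySem.Dict (List Int) (Int × Int) :=
  if pvKeyed thr p.2 then
    (if !best.contains (pvKey thr p.2) || (best.getD (pvKey thr p.2) (0, 0)).1 < (p.2.length : Int) then
      best.insert (pvKey thr p.2) ((p.2.length : Int), p.1)
    else best)
  else best

-- "x is the first longest member of group g (with length m)" , structurally from the left
def pvFM (thr : Int) : List (Int × List Int) → List Int → Int → Int → Prop
  | [], _, _, _ => False
  | e :: t, g, m, x =>
    if pvKeyed thr e.2 ∧ pvKey thr e.2 = g then
      ((e.1 = x ∧ (e.2.length : Int) = m ∧
          ∀ e' ∈ t, pvKeyed thr e'.2 → pvKey thr e'.2 = g → (e'.2.length : Int) ≤ m)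
        ∨ ((e.2.length : Int) < m ∧ pvFM thr t g m x))
    else pvFM thr t g m x

theorem pvFM_nil {thr : Int} {g : List Int} {m x : Int} : ¬ pvFM thr [] g m x := fun h => h

def pvNoG (thr : Int) (l : List (Int × List Int)) (g : List Int) : Prop :=
  ∀ e' ∈ l, pvKeyed thr e'.2 → pvKey thr e'.2 ≠ g

theorem pvFM_le (thr : Int) (l : List (Int × List Int)) (g : List Int) (m x : Int) :
    pvFM thr l g m x → ∀ e' ∈ l, pvKeyed thr e'.2 → pvKey thr e'.2 = g → (e'.2.length : Int) ≤ m := by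
  induction l with
  | nil => intro h; exact absurd h pvFM_nil
  | cons e t ih =>
    intro h e' he' hk hg
    unfold pvFM at h
    rcases List.mem_cons.mp he' with he' | he'
    · subst he'
      split_ifs at h with hc
      · rcases h with ⟨-, h2, -⟩ | ⟨h2, -⟩ <;> omega
      · exact absurd ⟨hk, hg⟩ hc
    · split_ifs at h with hc
      · rcases h with ⟨-, -, h3⟩ | ⟨-, h3⟩
        · exact h3 e' he' hk hg
        · exact ih h3 e' he' hk hg
      · exact ih h e' he' hk hg

theorem pvFM_mem (thr : Int) (l : List (Int × List Int)) (g : List Int) (m x : Int) :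
    pvFM thr l g m x →
    ∃ en ∈ l, en.1 = x ∧ pvKeyed thr en.2 ∧ pvKey thr en.2 = g ∧ (en.2.length : Int) = m := by
  induction l with
  | nil => intro h; exact absurd h pvFM_nil
  | cons e t ih =>
    intro h
    unfold pvFM at h
    split_ifs at h with hc
    · rcases h with ⟨h1, h2, -⟩ | ⟨-, h3⟩
      · exact ⟨e, by simp, h1, hc.1, hc.2, h2⟩
      · rcases ih h3 with ⟨en, hen, h4⟩; exact ⟨en, by simp [hen], h4⟩
    · rcases ih h with ⟨en, hen, h4⟩; exact ⟨en, by simp [hen], h4⟩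

theorem pvFM_append (thr : Int) (l : List (Int × List Int)) (e : Int × List Int)
    (g : List Int) (m x : Int) :
    pvFM thr (l ++ [e]) g m x ↔
      (pvFM thr l g m x ∧ (pvKeyed thr e.2 → pvKey thr e.2 = g → (e.2.length : Int) ≤ m))
      ∨ ((∀ e' ∈ l, pvKeyed thr e'.2 → pvKey thr e'.2 = g → (e'.2.length : Int) < m)
          ∧ pvKeyed thr e.2 ∧ pvKey thr e.2 = g ∧ e.1 = x ∧ (e.2.length : Int) = m) := by
  induction l with
  | nil =>
    simp only [List.nil_append, pvFM, List.not_mem_nil]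
    by_cases hc : pvKeyed thr e.2 ∧ pvKey thr e.2 = g
    · rw [if_pos hc]
      constructor
      · rintro (⟨h1, h2, -⟩ | ⟨-, h⟩)
        · exact Or.inr ⟨by simp, hc.1, hc.2, h1, h2⟩
        · exact h.elim
      · rintro (⟨h, -⟩ | ⟨-, -, -, h1, h2⟩)
        · exact h.elim
        · exact Or.inl ⟨h1, h2, by simp⟩
    · rw [if_neg hc]
      constructor
      · intro h; exact h.elim
      · rintro (⟨h, -⟩ | ⟨-, hk, hg, -⟩)
        · exact h.elim
        · exact absurd ⟨hk, hg⟩ hc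
  | cons a t ih =>
    have hunf : pvFM thr ((a :: t) ++ [e]) g m x ↔
        (if pvKeyed thr a.2 ∧ pvKey thr a.2 = g then
          ((a.1 = x ∧ (a.2.length : Int) = m ∧
              ∀ e' ∈ t ++ [e], pvKeyed thr e'.2 → pvKey thr e'.2 = g → (e'.2.length : Int) ≤ m)
            ∨ ((a.2.length : Int) < m ∧ pvFM thr (t ++ [e]) g m x))
        else pvFM thr (t ++ [e]) g m x) := by
      simp only [List.cons_append, pvFM]
    rw [hunf]
    simp only [List.forall_mem_append, List.forall_mem_singleton]
    rw [ih]
    simp only [pvFM, List.forall_mem_cons]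
    by_cases hc : pvKeyed thr a.2 ∧ pvKey thr a.2 = g
    · rw [if_pos hc, if_pos hc]
      constructor
      · rintro (⟨h1, h2, h3, h4⟩ | ⟨h1, (⟨h2, h3⟩ | ⟨h2, h3⟩)⟩)
        · exact Or.inl ⟨Or.inl ⟨h1, h2, h3⟩, fun hk hg => h4 hk hg⟩
        · exact Or.inl ⟨Or.inr ⟨h1, h2⟩, h3⟩
        · exact Or.inr ⟨⟨fun _ _ => h1, h2⟩, h3⟩
      · rintro (⟨(⟨h1, h2, h3⟩ | ⟨h1, h2⟩), h4⟩ | ⟨⟨h1, h2⟩, h3⟩)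
        · exact Or.inl ⟨h1, h2, h3, h4⟩
        · exact Or.inr ⟨h1, Or.inl ⟨h2, h4⟩⟩
        · exact Or.inr ⟨h1 hc.1 hc.2, Or.inr ⟨h2, h3⟩⟩
    · rw [if_neg hc, if_neg hc]
      constructor
      · rintro (⟨h1, h2⟩ | ⟨h1, h2⟩)
        · exact Or.inl ⟨h1, h2⟩
        · exact Or.inr ⟨⟨fun hk hg => absurd ⟨hk, hg⟩ hc, h1⟩, h2⟩
      · rintro (⟨h1, h2⟩ | ⟨⟨h1, h2⟩, h3⟩)
        · exact Or.inl ⟨h1, h2⟩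
        · exact Or.inr ⟨h2, h3⟩

theorem pvNoG_append (thr : Int) (l : List (Int × List Int)) (e : Int × List Int) (g : List Int) :
    pvNoG thr (l ++ [e]) g ↔ pvNoG thr l g ∧ (pvKeyed thr e.2 → pvKey thr e.2 ≠ g) := by
  simp only [pvNoG, List.forall_mem_append, List.forall_mem_singleton]

-- the best-dict invariant
theorem pvBest_spec (thr : Int) (l : List (Int × List Int)) :
    (∀ g, ((l.foldl (pvBestStep thr) PySem.Dict.empty).get? g = none ↔ pvNoG thr l g)) ∧
    (∀ g m x, ((l.foldl (pvBestStep thr) PySem.Dict.empty).get? g = some (m, x) ↔ pvFM thr l g m x)) := by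
  induction l using List.reverseRecOn with
  | nil =>
    constructor
    · intro g
      simp [pvNoG, PySem.Dict.get?_empty]
    · intro g m x
      simp only [List.foldl_nil, PySem.Dict.get?_empty]
      constructor
      · intro h; exact absurd h (by simp)
      · intro h; exact absurd h pvFM_nil
  | append_singleton l e ih =>
    obtain ⟨ihnone, ihsome⟩ := ih
    rw [List.foldl_append]
    simp only [List.foldl_cons, List.foldl_nil]
    set d := l.foldl (pvBestStep thr) PySem.Dict.empty with hd
    by_cases hk : pvKeyed thr e.2
    · set k := pvKey thr e.2 with hkey
      rcases hg : d.get? k with _ | ⟨m0, x0⟩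
      · -- no member of group k yet: insert
        have hcont : d.contains k = false := (PySem.Dict.get?_eq_none_iff_contains d k).mp hg
        have hnog : pvNoG thr l k := (ihnone k).mp hg
        have hstep : pvBestStep thr d e = d.insert k ((e.2.length : Int), e.1) := by
          unfold pvBestStep
          rw [if_pos hk, if_pos (by rw [← hkey, hcont]; simp)]
        rw [hstep]
        constructor
        · intro g
          by_cases hgk : g = k
          · subst hgk
            rw [PySem.Dict.get?_insert_self]
            constructor
            · intro h; exact absurd h (by simp)
            · intro h; exact absurd rfl (((pvNoG_append thr l e k).mp h).2 hk)
          · rw [PySem.Dict.get?_insert_of_ne _ _ hgk, ihnone g, pvNoG_append]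
            constructor
            · intro h; exact ⟨h, fun _ hgq => hgk (hgq ▸ rfl)⟩
            · intro h; exact h.1
        · intro g m x
          by_cases hgk : g = k
          · subst hgk
            rw [PySem.Dict.get?_insert_self, pvFM_append]
            constructor
            · intro h
              simp only [Option.some_inj, Prod.mk.injEq] at h
              obtain ⟨hm, hx⟩ := h
              exact Or.inr ⟨fun e' he' hk' hg' => absurd hg' (hnog e' he' hk'), hk, rfl, hx, hm⟩
            · rintro (⟨hfm, -⟩ | ⟨-, -, -, hx, hm⟩)
              · have := (ihsome k m x).mpr hfm
                rw [hg] at this; cases this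
              · rw [← hx, ← hm]
          · rw [PySem.Dict.get?_insert_of_ne _ _ hgk, ihsome g m x, pvFM_append]
            constructor
            · intro h; exact Or.inl ⟨h, fun _ hgq => absurd hgq (fun hq => hgk (hq ▸ rfl))⟩
            · rintro (⟨h, -⟩ | ⟨-, -, hgq, -⟩)
              · exact h
              · exact absurd hgq (fun hq => hgk (hq ▸ rfl))
      · -- group k already has first-max (m0, x0)
        have hfm0 := (ihsome k m0 x0).mp hg
        have hcont : d.contains k = true := by
          rcases h : d.contains k
          · rw [(PySem.Dict.get?_eq_none_iff_contains d k).mpr h] at hg; cases hg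
          · rfl
        have hgetD : d.getD k (0, 0) = (m0, x0) := by
          rw [PySem.Dict.getD_eq_get?_getD, hg]; rfl
        by_cases hlt : m0 < (e.2.length : Int)
        · -- strictly longer: overwrite
          have hstep : pvBestStep thr d e = d.insert k ((e.2.length : Int), e.1) := by
            unfold pvBestStep
            rw [if_pos hk, if_pos (by rw [← hkey, hgetD]; simp [hlt])]
          rw [hstep]
          have hall : ∀ e' ∈ l, pvKeyed thr e'.2 → pvKey thr e'.2 = k → (e'.2.length : Int) < (e.2.length : Int) :=
            fun e' he' hk' hg' => lt_of_le_of_lt (pvFM_le thr l k m0 x0 hfm0 e' he' hk' hg') hlt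
          constructor
          · intro g
            by_cases hgk : g = k
            · subst hgk
              rw [PySem.Dict.get?_insert_self]
              constructor
              · intro h; exact absurd h (by simp)
              · intro h; exact absurd rfl (((pvNoG_append thr l e k).mp h).2 hk)
            · rw [PySem.Dict.get?_insert_of_ne _ _ hgk, ihnone g, pvNoG_append]
              constructor
              · intro h; exact ⟨h, fun _ hgq => hgk (hgq ▸ rfl)⟩
              · intro h; exact h.1
          · intro g m x
            by_cases hgk : g = k
            · subst hgk
              rw [PySem.Dict.get?_insert_self, pvFM_append]
              constructor
              · intro h
                simp only [Option.some_inj, Prod.mk.injEq] at h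
                obtain ⟨hm, hx⟩ := h
                exact Or.inr ⟨hm ▸ hall, hk, rfl, hx, hm⟩
              · rintro (⟨hfm, hle⟩ | ⟨-, -, -, hx, hm⟩)
                · have := (ihsome k m x).mpr hfm
                  rw [hg] at this
                  simp only [Option.some_inj, Prod.mk.injEq] at this
                  have := hle hk rfl
                  omega
                · rw [← hx, ← hm]
            · rw [PySem.Dict.get?_insert_of_ne _ _ hgk, ihsome g m x, pvFM_append]
              constructor
              · intro h; exact Or.inl ⟨h, fun _ hgq => absurd hgq (fun hq => hgk (hq ▸ rfl))⟩
              · rintro (⟨h, -⟩ | ⟨-, -, hgq, -⟩)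
                · exact h
                · exact absurd hgq (fun hq => hgk (hq ▸ rfl))
        · -- not longer: keep the old first-max
          have hstep : pvBestStep thr d e = d := by
            unfold pvBestStep
            rw [if_pos hk, if_neg (by rw [← hkey, hcont, hgetD]; simpa using hlt)]
          rw [hstep]
          constructor
          · intro g
            by_cases hgk : g = k
            · subst hgk
              rw [hg]
              constructor
              · intro h; exact absurd h (by simp)
              · intro h; exact absurd rfl (((pvNoG_append thr l e k).mp h).2 hk)
            · rw [ihnone g, pvNoG_append]
              constructor
              · intro h; exact ⟨h, fun _ hgq => hgk (hgq ▸ rfl)⟩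
              · intro h; exact h.1
          · intro g m x
            by_cases hgk : g = k
            · subst hgk
              rw [hg, pvFM_append]
              constructor
              · intro h
                simp only [Option.some_inj, Prod.mk.injEq] at h
                obtain ⟨hm, hx⟩ := h
                exact Or.inl ⟨hm ▸ hx ▸ hfm0, fun _ _ => by omega⟩
              · rintro (⟨hfm, -⟩ | ⟨hall, -, -, hx, hm⟩)
                · have := (ihsome k m x).mpr hfm
                  rw [hg] at this
                  simp only [Option.some_inj, Prod.mk.injEq] at this
                  rw [this.1, this.2]
                · obtain ⟨en, hen, -, hken, hgen, hlen⟩ := pvFM_mem thr l k m0 x0 hfm0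
                  have := hall en hen hken hgen
                  omega
            · rw [ihsome g m x, pvFM_append]
              constructor
              · intro h; exact Or.inl ⟨h, fun _ hgq => absurd hgq (fun hq => hgk (hq ▸ rfl))⟩
              · rintro (⟨h, -⟩ | ⟨-, -, hgq, -⟩)
                · exact h
                · exact absurd hgq (fun hq => hgk (hq ▸ rfl))
    · -- unkeyed entry: dict unchanged
      have hstep : pvBestStep thr d e = d := by
        unfold pvBestStep
        rw [if_neg hk]
      rw [hstep]
      constructor
      · intro g
        rw [ihnone g, pvNoG_append]
        constructor
        · intro h; exact ⟨h, fun hq => absurd hq hk⟩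
        · intro h; exact h.1
      · intro g m x
        rw [ihsome g m x, pvFM_append]
        constructor
        · intro h; exact Or.inl ⟨h, fun hq => absurd hq hk⟩
        · rintro (⟨h, -⟩ | ⟨-, hq, -⟩)
          · exact h
          · exact absurd hq hk

theorem pvBest_nodup (thr : Int) (l : List (Int × List Int)) :
    (l.foldl (pvBestStep thr) PySem.Dict.empty).keys.Nodup := by
  induction l using List.reverseRecOn with
  | nil => exact PySem.Dict.nodup_keys_empty
  | append_singleton l e ih =>
    rw [List.foldl_append]
    simp only [List.foldl_cons, List.foldl_nil]
    unfold pvBestStep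
    split_ifs
    · exact PySem.Dict.nodup_keys_insert _ _ _ ih
    · exact ih
    · exact ih

-- ---------- dict plumbing ----------
theorem pvItems_foldl_erase (rs : List Int) :
    ∀ (d : PySem.Dict Int (List Int)),
      (rs.foldl (fun d r => d.erase r) d).items = d.items.filter (fun p => !(rs.contains p.1)) := by
  induction rs with
  | nil => intro d; simp
  | cons r rs ih =>
    intro d
    simp only [List.foldl_cons, ih]
    show (d.erase r).items.filter _ = _
    unfold PySem.Dict.erase
    rw [List.filter_filter]
    apply List.filter_congr
    intro p _
    simp only [List.contains_cons]
    cases h : (p.1 == r) <;> simp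

-- "e is the group's first maximum" at an explicit position
theorem pvFM_at (thr : Int) (u : List (Int × List Int)) (e : Int × List Int)
    (v : List (Int × List Int)) :
    ((u ++ e :: v).map Prod.fst).Nodup → pvKeyed thr e.2 →
    (pvFM thr (u ++ e :: v) (pvKey thr e.2) (e.2.length : Int) e.1 ↔
      ((∀ e' ∈ u, pvKeyed thr e'.2 → pvKey thr e'.2 = pvKey thr e.2 → (e'.2.length : Int) < (e.2.length : Int)) ∧
       (∀ e' ∈ v, pvKeyed thr e'.2 → pvKey thr e'.2 = pvKey thr e.2 → (e'.2.length : Int) ≤ (e.2.length : Int)))) := by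
  induction u with
  | nil =>
    intro hnd hk
    simp only [List.nil_append, pvFM]
    rw [if_pos (⟨hk, trivial⟩ : pvKeyed thr e.2 ∧ True)]
    constructor
    · rintro (⟨-, -, h⟩ | ⟨h1, -⟩)
      · exact ⟨by simp, h⟩
      · omega
    · rintro ⟨-, h2⟩
      exact Or.inl ⟨trivial, trivial, h2⟩
  | cons a u' ih =>
    intro hnd hk
    simp only [List.cons_append, List.map_cons, List.nodup_cons] at hnd
    obtain ⟨hmem, hnd2⟩ := hnd
    have hne : e.1 ≠ a.1 := fun hq => hmem (hq ▸ List.mem_map_of_mem (by simp : e ∈ u' ++ e :: v))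
    have hunf : pvFM thr ((a :: u') ++ e :: v) (pvKey thr e.2) (e.2.length : Int) e.1 ↔
        (if pvKeyed thr a.2 ∧ pvKey thr a.2 = pvKey thr e.2 then
          ((a.1 = e.1 ∧ (a.2.length : Int) = (e.2.length : Int) ∧
              ∀ e' ∈ u' ++ e :: v, pvKeyed thr e'.2 → pvKey thr e'.2 = pvKey thr e.2 → (e'.2.length : Int) ≤ (e.2.length : Int))
            ∨ ((a.2.length : Int) < (e.2.length : Int) ∧ pvFM thr (u' ++ e :: v) (pvKey thr e.2) (e.2.length : Int) e.1))
        else pvFM thr (u' ++ e :: v) (pvKey thr e.2) (e.2.length : Int) e.1) := by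
      simp only [List.cons_append, pvFM]
    rw [hunf]
    simp only [List.forall_mem_cons]
    by_cases hc : pvKeyed thr a.2 ∧ pvKey thr a.2 = pvKey thr e.2
    · rw [if_pos hc, ih hnd2 hk]
      constructor
      · rintro (⟨h1, -, -⟩ | ⟨h1, h2⟩)
        · exact absurd h1.symm hne
        · exact ⟨⟨fun _ _ => h1, h2.1⟩, h2.2⟩
      · rintro ⟨⟨ha, hu'⟩, h2⟩
        exact Or.inr ⟨ha hc.1 hc.2, hu', h2⟩
    · rw [if_neg hc, ih hnd2 hk]
      constructor
      · rintro ⟨h1, h2⟩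
        exact ⟨⟨fun hk' hg' => absurd ⟨hk', hg'⟩ hc, h1⟩, h2⟩
      · rintro ⟨⟨-, h1⟩, h2⟩
        exact ⟨h1, h2⟩

-- A keeps an entry iff B keeps it
theorem pvKeepIff (thr : Int) (l : List (Int × List Int)) (p : Int × List Int)
    (hp : p ∈ l) (hnd : (l.map Prod.fst).Nodup) :
    (¬ pvRemP thr l p.1) ↔ (¬ pvKeyed thr p.2 ∨ ∃ g m, pvFM thr l g m p.1) := by
  obtain ⟨u, v, hl⟩ := List.append_of_mem hp
  subst hl
  rw [pvNotRemP_iff thr u p v hnd]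
  by_cases hk : pvKeyed thr p.2
  · constructor
    · rintro ⟨h1, h2⟩
      refine Or.inr ⟨pvKey thr p.2, (p.2.length : Int), (pvFM_at thr u p v hnd hk).mpr ⟨?_, ?_⟩⟩
      · intro e' he' hk' hg'
        exact h1 e' he' ((pvTrig_iff thr e'.2 p.2).mpr ⟨hk', hk, hg'⟩)
      · intro e' he' hk' hg'
        exact h2 e' he' ((pvTrig_iff thr p.2 e'.2).mpr ⟨hk, hk', hg'.symm⟩)
    · rintro (hk' | ⟨g, m, hfm⟩)
      · exact absurd hk hk'
      · obtain ⟨en, hen, hx, hken, hgen, hlen⟩ := pvFM_mem thr _ g m p.1 hfm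
        have hep : en = p := List.inj_on_of_nodup_map hnd hen hp hx
        subst hep
        rw [← hgen, ← hlen] at hfm
        have hat := (pvFM_at thr u en v hnd hk).mp hfm
        refine ⟨fun e' he' htr => ?_, fun e' he' htr => ?_⟩
        · obtain ⟨hk', -, hg'⟩ := (pvTrig_iff thr e'.2 en.2).mp htr
          exact hat.1 e' he' hk' hg'
        · obtain ⟨-, hk', hg'⟩ := (pvTrig_iff thr en.2 e'.2).mp htr
          exact hat.2 e' he' hk' hg'.symm
  · constructor
    · intro _; exact Or.inl hk
    · intro _
      refine ⟨fun e' he' htr => ?_, fun e' he' htr => ?_⟩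
      · exact absurd ((pvTrig_iff thr e'.2 p.2).mp htr).2.1 hk
      · exact absurd ((pvTrig_iff thr p.2 e'.2).mp htr).1 hk

-- B's loop body is pvBestStep
theorem pvBestStep_eq (thr : Int) (best : PySem.Dict (List Int) (Int × Int)) (p : Int × List Int) :
    (if thr > 0 && PySem.List.len p.2 < thr then best
     else
       let key := if thr > 0 then PySem.List.slice p.2 none (some thr) else []
       if !best.contains key || PySem.List.len p.2 > (best.getD key (0, 0)).1 then
         best.insert key (PySem.List.len p.2, p.1)
       else best)
    = pvBestStep thr best p := by
  unfold pvBestStep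
  by_cases h0 : 0 < thr
  · have hkeyeq : (if thr > 0 then PySem.List.slice p.2 none (some thr) else []) = pvKey thr p.2 := by
      rw [if_pos h0, pvKey, if_pos h0, PySem.List.slice_to _ (le_of_lt h0)]
    by_cases hshort : (p.2.length : Int) < thr
    · have hk : ¬ pvKeyed thr p.2 := fun h => by have := h h0; omega
      rw [if_neg hk, if_pos (by simp [PySem.List.len_eq, h0, hshort])]
    · have hk : pvKeyed thr p.2 := fun _ => by omega
      rw [if_pos hk, if_neg (by simp [PySem.List.len_eq, h0, hshort])]
      simp only [hkeyeq, PySem.List.len_eq, gt_iff_lt]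
  · have hk : pvKeyed thr p.2 := fun h => absurd h h0
    have hkeyeq : (if thr > 0 then PySem.List.slice p.2 none (some thr) else []) = pvKey thr p.2 := by
      rw [if_neg h0, pvKey, if_neg h0]
    rw [if_pos hk, if_neg (by simp [h0])]
    simp only [hkeyeq, PySem.List.len_eq, gt_iff_lt]

-- A's inner loop over the remaining key indices, with dict lookups
def pvStepK (thr : Int) (fb0 : PySem.Dict Int (List Int)) (e1k : Int) (t : List Int) (s : PySem.Set Int) : PySem.Set Int :=
  t.foldl (fun s e2k =>
    if pvCommonLoopA (fb0.getD e1k []) (fb0.getD e2k [])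
        (PySem.List.pyRange 0 (min (PySem.List.len (fb0.getD e1k [])) (PySem.List.len (fb0.getD e2k [])))) 0 ≥ thr then
      if PySem.List.len (fb0.getD e1k []) < PySem.List.len (fb0.getD e2k []) then PySem.Set.add s e1k
      else PySem.Set.add s e2k
    else s) s

theorem pvRemoveSet_eq (thr : Int) (fb0 : PySem.Dict Int (List Int)) (hnd : fb0.keys.Nodup) :
    List.foldl (fun rem i => List.foldl (fun rem j =>
        if pvCommonLoopA (fb0.getD (PySem.List.pyGetD fb0.keys i 0) []) (fb0.getD (PySem.List.pyGetD fb0.keys j 0) [])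
            (PySem.List.pyRange 0 (min (PySem.List.len (fb0.getD (PySem.List.pyGetD fb0.keys i 0) []))
              (PySem.List.len (fb0.getD (PySem.List.pyGetD fb0.keys j 0) [])))) 0 ≥ thr then
          if PySem.List.len (fb0.getD (PySem.List.pyGetD fb0.keys i 0) []) <
              PySem.List.len (fb0.getD (PySem.List.pyGetD fb0.keys j 0) []) then
            PySem.Set.add rem (PySem.List.pyGetD fb0.keys i 0)
          else PySem.Set.add rem (PySem.List.pyGetD fb0.keys j 0)
        else rem) rem (PySem.List.pyRange (i + 1) (PySem.List.len fb0.keys)))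
      PySem.Set.empty (PySem.List.pyRange 0 (PySem.List.len fb0.keys))
    = pvPairFold (pvStepF thr) fb0.items PySem.Set.empty := by
  have hcong : ∀ (acc : PySem.Set Int), ∀ i ∈ PySem.List.pyRange 0 (PySem.List.len fb0.keys),
      List.foldl (fun rem j =>
        if pvCommonLoopA (fb0.getD (PySem.List.pyGetD fb0.keys i 0) []) (fb0.getD (PySem.List.pyGetD fb0.keys j 0) [])
            (PySem.List.pyRange 0 (min (PySem.List.len (fb0.getD (PySem.List.pyGetD fb0.keys i 0) []))
              (PySem.List.len (fb0.getD (PySem.List.pyGetD fb0.keys j 0) [])))) 0 ≥ thr then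
          if PySem.List.len (fb0.getD (PySem.List.pyGetD fb0.keys i 0) []) <
              PySem.List.len (fb0.getD (PySem.List.pyGetD fb0.keys j 0) []) then
            PySem.Set.add rem (PySem.List.pyGetD fb0.keys i 0)
          else PySem.Set.add rem (PySem.List.pyGetD fb0.keys j 0)
        else rem) acc (PySem.List.pyRange (i + 1) (PySem.List.len fb0.keys))
      = pvStepK thr fb0 (PySem.List.pyGetD fb0.keys i 0) (fb0.keys.drop (i + 1).toNat) acc := by
    intro acc i hi
    have h0 : (0 : Int) ≤ i := ((PySem.List.mem_pyRange_one).mp hi).1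
    exact PySem.List.foldl_pyRange_pyGetD fb0.keys 0
      (fun s e2k =>
        if pvCommonLoopA (fb0.getD (PySem.List.pyGetD fb0.keys i 0) []) (fb0.getD e2k [])
            (PySem.List.pyRange 0 (min (PySem.List.len (fb0.getD (PySem.List.pyGetD fb0.keys i 0) []))
              (PySem.List.len (fb0.getD e2k [])))) 0 ≥ thr then
          if PySem.List.len (fb0.getD (PySem.List.pyGetD fb0.keys i 0) []) < PySem.List.len (fb0.getD e2k []) then
            PySem.Set.add s (PySem.List.pyGetD fb0.keys i 0)
          else PySem.Set.add s e2k
        else s) acc (by omega)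
  rw [PySem.List.foldl_congr_mem _ _
    (fun acc i => pvStepK thr fb0 (PySem.List.pyGetD fb0.keys i 0) (fb0.keys.drop (i + 1).toNat) acc) _ hcong]
  rw [pvOuter fb0.keys 0 (pvStepK thr fb0) fb0.keys.length 0 le_rfl (by simp)]
  simp only [Int.toNat_zero, List.drop_zero]
  have hkeys : fb0.keys = fb0.items.map Prod.fst := rfl
  rw [hkeys, pvPairFold_map]
  apply pvPairFold_congr
  intro e he t ht s
  show pvStepK thr fb0 e.1 (t.map Prod.fst) s = pvStepF thr e t s
  unfold pvStepK pvStepF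
  rw [List.foldl_map]
  apply PySem.List.foldl_congr_mem
  intro acc e2 he2
  have h1 : fb0.getD e.1 [] = e.2 := PySem.Dict.getD_of_mem_items fb0 he hnd []
  have h2 : fb0.getD e2.1 [] = e2.2 := PySem.Dict.getD_of_mem_items fb0 (ht e2 he2) hnd []
  rw [h1, h2, pvCommonLoopA_eq]
  unfold pvStep
  simp only [ge_iff_le, PySem.List.len_eq]
  rfl

theorem pvPointwise (thr : Int) (fbs : List (Int × List Int)) :
    ∀ p ∈ (PySem.Dict.ofList fbs).items,
      (!List.contains (pvPairFold (pvStepF thr) (PySem.Dict.ofList fbs).items PySem.Set.empty) p.1)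
      = (decide (thr > 0) && decide (PySem.List.len p.2 < thr) ||
         PySem.Set.contains (List.foldl (fun s v => PySem.Set.add s v.2) PySem.Set.empty
           (List.foldl (pvBestStep thr) PySem.Dict.empty (PySem.Dict.ofList fbs).items).values) p.1) := by
  intro p hp
  have hndl : (((PySem.Dict.ofList fbs).items).map Prod.fst).Nodup := PySem.Dict.nodup_keys_ofList fbs
  set l := (PySem.Dict.ofList fbs).items with hl
  set best := List.foldl (pvBestStep thr) PySem.Dict.empty l with hbest
  have hA : List.contains (pvPairFold (pvStepF thr) l PySem.Set.empty) p.1 = true ↔ pvRemP thr l p.1 := by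
    rw [List.contains_iff_mem, mem_pvPairFold_stepF]
    simp [PySem.Set.empty]
  have hB : PySem.Set.contains (List.foldl (fun s v => PySem.Set.add s v.2) PySem.Set.empty best.values) p.1 = true
      ↔ ∃ g m, pvFM thr l g m p.1 := by
    rw [PySem.Set.contains_iff, PySem.Set.mem_foldl_add]
    have hvals : best.values = best.items.map (fun q => q.2) := rfl
    constructor
    · rintro (hemp | ⟨b, hb, hpb⟩)
      · exact absurd hemp (by simp [PySem.Set.empty])
      · rw [hvals] at hb
        obtain ⟨pr, hpr, hb2⟩ := List.mem_map.mp hb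
        refine ⟨pr.1, b.1, ((pvBest_spec thr l).2 pr.1 b.1 p.1).mp ?_⟩
        have hsome : best.get? pr.1 = some pr.2 :=
          (PySem.Dict.get?_eq_some_iff_mem_items best pr.1 pr.2 (pvBest_nodup thr l)).mpr hpr
        rw [hsome, hb2, hpb]
    · rintro ⟨g, m, hfm⟩
      have hsome := ((pvBest_spec thr l).2 g m p.1).mpr hfm
      have hmemit : (g, (m, p.1)) ∈ best.items :=
        (PySem.Dict.get?_eq_some_iff_mem_items best g (m, p.1) (pvBest_nodup thr l)).mp hsome
      exact Or.inr ⟨(m, p.1), by rw [hvals]; exact List.mem_map.mpr ⟨(g, (m, p.1)), hmemit, rfl⟩, rfl⟩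
  have hcond : (decide (thr > 0) && decide (PySem.List.len p.2 < thr)) = true ↔ ¬ pvKeyed thr p.2 := by
    simp only [Bool.and_eq_true, decide_eq_true_eq, PySem.List.len_eq, pvKeyed, gt_iff_lt]
    omega
  rw [Bool.eq_iff_iff, Bool.not_eq_true', ← Bool.not_eq_true, Bool.or_eq_true]
  rw [hA, hcond, hB]
  exact pvKeepIff thr l p hp hndl

-- ===== MAIN ASSEMBLY =====

theorem remove_short_overlapping_branches_eq (fbs : List (Int × List Int)) (thr : Int) :
    remove_short_overlapping_branches fbs thr = remove_short_overlapping_branches_alt fbs thr := by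
  unfold remove_short_overlapping_branches remove_short_overlapping_branches_alt
  simp only []
  have hnd : (PySem.Dict.ofList fbs).keys.Nodup := PySem.Dict.nodup_keys_ofList fbs
  rw [pvRemoveSet_eq thr (PySem.Dict.ofList fbs) hnd]
  rw [PySem.List.foldl_congr_mem ((PySem.Dict.ofList fbs).items) _ (pvBestStep thr) PySem.Dict.empty
    (fun acc x _ => pvBestStep_eq thr acc x)]
  have hkeysA : ∀ (d : PySem.Dict Int (List Int)), d.keys = d.items.map (fun q => q.1) := fun _ => rfl
  rw [hkeysA, hkeysA, pvItems_foldl_erase, List.filter_congr (pvPointwise thr fbs)]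
  have hsub : ((((PySem.Dict.ofList fbs).items).filter
      (fun p => decide (thr > 0) && decide (PySem.List.len p.2 < thr) ||
        PySem.Set.contains (List.foldl (fun s v => PySem.Set.add s v.2) PySem.Set.empty
          (List.foldl (pvBestStep thr) PySem.Dict.empty (PySem.Dict.ofList fbs).items).values) p.1)).map
      Prod.fst).Nodup := by
    have hndl : (((PySem.Dict.ofList fbs).items).map Prod.fst).Nodup := hnd
    exact List.Nodup.sublist (List.Sublist.map Prod.fst List.filter_sublist) hndl
  rw [PySem.List.foldl_if_eq_foldl_filter
    (fun p => decide (thr > 0) && decide (PySem.List.len p.2 < thr) ||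
      PySem.Set.contains (List.foldl (fun s v => PySem.Set.add s v.2) PySem.Set.empty
        (List.foldl (pvBestStep thr) PySem.Dict.empty (PySem.Dict.ofList fbs).items).values) p.1)
    (fun d p => d.insert p.1 p.2) ((PySem.Dict.ofList fbs).items) PySem.Dict.empty]
  rw [PySem.Dict.items_foldl_insert_fresh _ Prod.fst Prod.snd PySem.Dict.empty
    (fun a _ => PySem.Dict.contains_empty a.1) hsub]
  have hemp : (PySem.Dict.empty : PySem.Dict Int (List Int)).items = [] := rfl
  rw [hemp]
  simp only [List.nil_append, Prod.mk.eta, List.map_id']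

-- ===== VERDICT (by name: the statement is the Claim_ definition above) =====
theorem remove_short_overlapping_branches_spec : Claim_equal_remove_short_overlapping_branches := by
  intro fbs thr _
  unfold Spec_remove_short_overlapping_branches
  exact remove_short_overlapping_branches_eq fbs thr
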